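-- pv_equiv track=rewrite | github.com/joncar/pylitejet | pylitejet/__init__.py | _hex2bits
-- ===== SOURCE A (Python) =====
-- from typing import Optional, Dict
--
-- def _hex2bits(response: str, input_first: int, input_last: int, output_first: int, output: Dict[int, bool]):
--     output_number = output_first
--     for digit in range(input_first, input_last, 2):
--         digit_value = int(response[digit : digit + 2], 16)
--         for bit in range(0, 8):
--             bit_value = (digit_value & (1 << bit)) != 0
--             output[output_number] = bit_value
--             output_number += 1
--     return output
-- ===== SOURCE B (Python) =====
-- def _hex2bits(response, input_first, input_last, output_first, output):
--     n = 0
--     shift = 0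
--     for digit in range(input_first, input_last, 2):
--         n += (int(response[digit : digit + 2], 16) % 256) << shift
--         shift += 8
--     for i in range(shift):
--         output[output_first + i] = n & 1 == 1
--         n >>= 1
--     return output
-- ===== Notes on version B (the rewrite author's own statement) =====
-- stated objective: alternative
-- what changed: Instead of emitting 8 bits per hex pair in a nested loop, B packs all parsed pairs (masked to a byte) little-endian into one big integer and then streams that integer's bits out with repeated n&1 / n>>=1 shifting, so bit extraction is stateful shifting over a single accumulator rather than per-byte masking.
import Mathlib
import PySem

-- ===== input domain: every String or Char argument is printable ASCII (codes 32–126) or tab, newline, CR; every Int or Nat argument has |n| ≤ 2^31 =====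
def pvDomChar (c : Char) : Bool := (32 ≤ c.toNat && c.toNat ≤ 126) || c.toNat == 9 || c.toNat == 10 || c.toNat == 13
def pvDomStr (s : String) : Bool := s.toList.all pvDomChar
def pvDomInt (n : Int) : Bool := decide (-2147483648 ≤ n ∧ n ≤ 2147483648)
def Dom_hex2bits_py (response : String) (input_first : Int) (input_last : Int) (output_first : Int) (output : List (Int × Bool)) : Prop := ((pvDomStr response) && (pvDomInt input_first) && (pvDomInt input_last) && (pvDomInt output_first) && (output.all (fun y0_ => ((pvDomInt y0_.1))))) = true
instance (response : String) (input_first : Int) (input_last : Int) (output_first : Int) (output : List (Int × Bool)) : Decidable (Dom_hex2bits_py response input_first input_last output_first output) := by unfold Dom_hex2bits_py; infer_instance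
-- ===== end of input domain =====

-- B packs all parsed hex pairs (masked to a byte) little-endian into ONE big integer and then
-- streams that integer's bits out by repeated n&1 / n>>=1 shifting, replacing A's nested
-- pair/bit loops and per-bit masking (objective: alternative, not faster).
-- A mutates the 'output' dict in place; the equivalence proved here is about the RETURN value.

-- ===== PORT A =====
def hex2bits_py (response : String) (input_first : Int) (input_last : Int) (output_first : Int) (output : List (Int × Bool)) : List (Int × Bool) :=
  let st :=
    (PySem.List.pyRange input_first input_last 2).foldl
      (fun (st : Int × PySem.Dict Int Bool) digit =>
        let digit_value : Int :=
          (PySem.Int.ofStrBase? (PySem.Str.slice response (some digit) (some (digit + 2))) 16).getD 0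
        (PySem.List.pyRange 0 8 1).foldl
          (fun st bit =>
            let bit_value : Bool := decide (PySem.Int.band digit_value ((1 : Int) <<< bit.toNat) ≠ 0)
            (st.1 + 1, st.2.insert st.1 bit_value))
          st)
      (output_first, PySem.Dict.ofList output)
  st.2.items

-- ===== PORT B =====
def hex2bits_py_alt (response : String) (input_first : Int) (input_last : Int) (output_first : Int) (output : List (Int × Bool)) : List (Int × Bool) :=
  let st : Int × Int :=
    (PySem.List.pyRange input_first input_last 2).foldl
      (fun (st : Int × Int) digit =>
        (st.1 + (PySem.Int.mod ((PySem.Int.ofStrBase? (PySem.Str.slice response (some digit) (some (digit + 2))) 16).getD 0) 256) <<< st.2.toNat,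
         st.2 + 8))
      (0, 0)
  ((PySem.List.pyRange 0 st.2 1).foldl
      (fun (acc : Int × PySem.Dict Int Bool) i =>
        (acc.1 >>> (1:Nat), acc.2.insert (output_first + i) (decide (PySem.Int.band acc.1 1 = 1))))
      (st.1, PySem.Dict.ofList output)).2.items

-- ===== PRECONDITION & SPEC =====
-- Pre_ : exactly the inputs on which Python A returns: every two-character slice taken by the
-- loop parses as a base-16 int (otherwise A raises ValueError; B raises identically there).
-- Pre_ ⟺ the loop's slices all parse: the two range bounds are implied by parseability
-- (a digit outside [-len-1, len-1] slices to the empty string, which int(·,16) rejects);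
-- they only let the condition be decided without materialising a huge empty-slice range.
def Pre_hex2bits_py (response : String) (input_first : Int) (input_last : Int) (output_first : Int) (output : List (Int × Bool)) : Prop :=
  (decide (input_last ≤ input_first) ||
    (decide (-(PySem.Str.len response + 1) ≤ input_first) &&
     decide (input_last ≤ PySem.Str.len response + 2) &&
     (PySem.List.pyRange input_first input_last 2).all
       (fun digit =>
         (PySem.Int.ofStrBase? (PySem.Str.slice response (some digit) (some (digit + 2))) 16).isSome))) = true
instance (response : String) (input_first : Int) (input_last : Int) (output_first : Int) (output : List (Int × Bool)) : Decidable (Pre_hex2bits_py response input_first input_last output_first output) := by unfold Pre_hex2bits_py; infer_instance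

def pvWitness_hex2bits_py : String × Int × Int × Int × (List (Int × Bool)) := ("0fa3", 0, 4, 10, [(5, true)])

def Spec_hex2bits_py (response : String) (input_first : Int) (input_last : Int) (output_first : Int) (output : List (Int × Bool)) (out : List (Int × Bool)) : Prop := out = hex2bits_py_alt response input_first input_last output_first output
instance (response : String) (input_first : Int) (input_last : Int) (output_first : Int) (output : List (Int × Bool)) (out : List (Int × Bool)) : Decidable (Spec_hex2bits_py response input_first input_last output_first output out) := by unfold Spec_hex2bits_py; infer_instance

-- ===== CLAIM (what is proved, stated in full; the proofs are below) =====
def Claim_equal_hex2bits_py : Prop := ∀ (response : String) (input_first : Int) (input_last : Int) (output_first : Int) (output : List (Int × Bool)), Dom_hex2bits_py response input_first input_last output_first output → Pre_hex2bits_py response input_first input_last output_first output → Spec_hex2bits_py response input_first input_last output_first output (hex2bits_py response input_first input_last output_first output)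

-- ===== LEMMAS AND PROOFS =====

-- A's inner 8-bit loop, as a step function on (output_number, dict).
def pvStep (st : Int × PySem.Dict Int Bool) (v : Int) : Int × PySem.Dict Int Bool :=
  (PySem.List.pyRange 0 8 1).foldl
    (fun st bit =>
      (st.1 + 1, st.2.insert st.1 (decide (PySem.Int.band v ((1 : Int) <<< bit.toNat) ≠ 0))))
    st

-- B's packing step (first loop) and bit-streaming step (second loop).
def pvPackStep (st : Int × Int) (v : Int) : Int × Int :=
  (st.1 + (PySem.Int.mod v 256) <<< st.2.toNat, st.2 + 8)

def pvBool (n : Int) : Bool := decide (PySem.Int.band n 1 = 1)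

def pvStream (outf : Int) (acc : Int × PySem.Dict Int Bool) (i : Int) : Int × PySem.Dict Int Bool :=
  (acc.1 >>> (1:Nat), acc.2.insert (outf + i) (pvBool acc.1))

lemma pvRange8 : PySem.List.pyRange 0 8 1 = [0, 1, 2, 3, 4, 5, 6, 7] := by decide

lemma pvRangeShift8 (m : Int) :
    PySem.List.pyRange m (m + 8) 1 = [m, m+1, m+2, m+3, m+4, m+5, m+6, m+7] := by
  rw [PySem.List.pyRange_one]
  have : (m + 8 - m).toNat = 8 := by omega
  rw [this]
  have h8 : List.range 8 = [0,1,2,3,4,5,6,7] := by decide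
  rw [h8]
  norm_num

@[simp] lemma pvCastShiftR (n : Nat) : ((n : Int)) >>> (1 : Nat) = ((n >>> 1 : Nat) : Int) := rfl

@[simp] lemma pvBoolCast (n : Nat) :
    pvBool ((n : Nat) : Int) = decide (n % 2 = 1) := by
  unfold pvBool
  rw [PySem.Int.band_one]
  have h : PySem.Int.mod ((n : Nat) : Int) 2 = ((n % 2 : Nat) : Int) := by
    exact_mod_cast PySem.Int.mod_natCast n 2
  rw [h, decide_eq_decide]
  omega

lemma pvShiftLeftNat (r : Int) (h : 0 ≤ r) (k : Nat) : r <<< k = r * 2 ^ k := by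
  have : r = ((r.toNat : Nat) : Int) := by omega
  rw [this]
  have : ((r.toNat : Nat) : Int) <<< k = ((r.toNat <<< k : Nat) : Int) := rfl
  rw [this, Nat.shiftLeft_eq]
  push_cast
  ring

-- bit j of v's low byte (as Python's % 256) = Python's v & (1 << j), for j < 8, any sign of v
set_option maxRecDepth 20000 in
lemma pvKey (v : Int) (j : Nat) (hj : j < 8) :
    decide ((((PySem.Int.mod v 256).toNat) >>> j) % 2 = 1)
      = decide (PySem.Int.band v ((1 : Int) <<< j) ≠ 0) := by
  have hpow : (1 : Int) <<< j = ((2 ^ j : Nat) : Int) := by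
    show ((1 <<< j : Nat) : Int) = _
    rw [Nat.shiftLeft_eq]; norm_num
  have hmod : PySem.Int.mod v 256 = v % 256 := PySem.Int.mod_eq_emod_of_pos (by norm_num)
  rcases v with a | u
  · -- v = ↑a, a : Nat
    have h1 : PySem.Int.mod (Int.ofNat a) 256 = ((a % 256 : Nat) : Int) := by
      exact_mod_cast PySem.Int.mod_natCast a 256
    have h2 : PySem.Int.band (Int.ofNat a) ((2 ^ j : Nat) : Int) = ((a &&& 2 ^ j : Nat) : Int) := by
      exact_mod_cast PySem.Int.band_natCast a (2 ^ j)
    simp only [hpow, h1, h2, Int.toNat_natCast, ne_eq, Nat.cast_eq_zero]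
    rw [decide_eq_decide, Nat.shiftRight_eq_div_pow, Nat.and_two_pow]
    have htb : (a % 256).testBit j = a.testBit j := by
      have := Nat.testBit_mod_two_pow a 8 j
      simpa [show (256 : Nat) = 2 ^ 8 by norm_num, hj] using this
    rw [Nat.testBit_eq_decide_div_mod_eq] at htb
    have hp : 0 < 2 ^ j := Nat.two_pow_pos j
    rcases h3 : a.testBit j with _ | _ <;> rw [h3] at htb <;>
      simp_all [Nat.testBit_eq_decide_div_mod_eq]
  · -- v = Int.negSucc u = -↑u - 1
    have hv : Int.negSucc u = -(u : Int) - 1 := by omega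
    have hband : PySem.Int.band (Int.negSucc u) ((2 ^ j : Nat) : Int)
        = ((2 ^ j - (2 ^ j &&& u) : Nat) : Int) := by
      rw [PySem.Int.band]
      have h0 : ¬ (0 ≤ Int.negSucc u) := by omega
      have h1 : (0 : Int) ≤ ((2 ^ j : Nat) : Int) := by positivity
      simp only [h0, if_false, h1, if_true]
      have hA : ((2 ^ j : Nat) : Int).toNat = 2 ^ j := Int.toNat_natCast _
      have hB : (-(Int.negSucc u) - 1).toNat = u := by omega
      rw [hA, hB]
    have hmodv : PySem.Int.mod (Int.negSucc u) 256 = ((255 - u % 256 : Nat) : Int) := by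
      rw [hmod]
      have hc : ((u : Int)) % 256 = ((u % 256 : Nat) : Int) := by
        exact_mod_cast (Int.natCast_mod u 256).symm
      have hb : (u % 256 : Nat) < 256 := Nat.mod_lt _ (by norm_num)
      omega
    rw [hmodv, hpow, hband]
    simp only [Int.toNat_natCast]
    have htb : u.testBit j = (u % 256).testBit j := by
      have := Nat.testBit_mod_two_pow u 8 j
      simp [show (256 : Nat) = 2 ^ 8 by norm_num, this, hj]
    have hand : 2 ^ j &&& u = (u.testBit j).toNat * 2 ^ j := by
      rw [Nat.and_comm, Nat.and_two_pow]
    rw [hand, htb]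
    have hb : (u % 256 : Nat) < 256 := Nat.mod_lt _ (by norm_num)
    have key : ∀ (s : Fin 256) (jj : Fin 8),
        decide ((((255 - s.val) : Nat) >>> jj.val) % 2 = 1)
          = decide (((2 ^ jj.val - (s.val.testBit jj.val).toNat * 2 ^ jj.val : Nat) : Int) ≠ 0) := by
      decide
    exact key ⟨u % 256, hb⟩ ⟨j, hj⟩

-- combined: bit j of the packed accumulator r.toNat + 256*m (j < 8) is A's bit of v
lemma pvBit (v : Int) (m : Nat) (j : Nat) (hj : j < 8) :
    decide (((((PySem.Int.mod v 256).toNat + 256 * m)) >>> j) % 2 = 1)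
      = decide (PySem.Int.band v ((1 : Int) <<< j) ≠ 0) := by
  rw [← pvKey v j hj]
  have hr : (PySem.Int.mod v 256).toNat < 256 := by
    have h1 := PySem.Int.mod_lt v (show (0:Int) < 256 by norm_num)
    have h2 := PySem.Int.mod_nonneg v (show (0:Int) < 256 by norm_num)
    omega
  rw [decide_eq_decide]
  generalize (PySem.Int.mod v 256).toNat = a at hr
  rw [Nat.shiftRight_eq_div_pow, Nat.shiftRight_eq_div_pow,
      show a + 256 * m = a + (2 ^ (8 - j) * m) * 2 ^ j by
        rw [show (2:Nat) ^ (8 - j) * m * 2 ^ j = 2 ^ (8 - j + j) * m by rw [pow_add]; ring,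
            show 8 - j + j = 8 by omega]
        norm_num,
      Nat.add_mul_div_right _ _ (Nat.two_pow_pos j)]
  obtain ⟨e, he⟩ : 2 ∣ 2 ^ (8 - j) * m :=
    Dvd.dvd.mul_right (dvd_pow_self 2 (by omega)) m
  omega

-- snd of the packing fold counts 8 per element
lemma pvPackSnd (vs : List Int) : ∀ (a b : Int),
    (vs.foldl pvPackStep (a, b)).2 = b + 8 * vs.length := by
  induction vs with
  | nil => intro a b; simp
  | cons v t ih =>
    intro a b
    simp only [List.foldl_cons, pvPackStep]
    rw [ih]
    simp only [List.length_cons]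
    push_cast
    ring

-- the 8 bit-stream steps over one byte reproduce A's inner loop
set_option maxRecDepth 20000 in
lemma pvEight (outf : Int) (v : Int) (m : Nat) (p : Int) (dA : PySem.Dict Int Bool) :
    (PySem.List.pyRange p (p + 8) 1).foldl (pvStream outf)
        ((((PySem.Int.mod v 256).toNat + 256 * m : Nat) : Int), dA)
      = ((m : Int), (pvStep (outf + p, dA) v).2)
    ∧ (pvStep (outf + p, dA) v).1 = outf + p + 8 := by
  rw [pvRangeShift8]
  simp only [pvStep, pvRange8, List.foldl_cons, List.foldl_nil, pvStream]
  simp only [pvCastShiftR]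
  have hsr : ∀ (n k : Nat), (n >>> k) >>> 1 = n >>> (k + 1) := by
    intro n k; rw [Nat.shiftRight_add]
  set M : Nat := (PySem.Int.mod v 256).toNat + 256 * m with hM
  have hbit : ∀ (j : Nat), j < 8 →
      decide ((M >>> j) % 2 = 1) = decide (PySem.Int.band v ((1 : Int) <<< j) ≠ 0) := by
    intro j hj
    rw [Nat.shiftRight_eq_div_pow]
    have := pvBit v m j hj
    rw [Nat.shiftRight_eq_div_pow] at this
    exact this
  refine ⟨Prod.ext_iff.mpr ⟨?_, ?_⟩, ?_⟩
  · -- carry after 8 shifts is m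
    simp only [hsr]
    have hr : (PySem.Int.mod v 256).toNat < 256 := by
      have h1 := PySem.Int.mod_lt v (show (0:Int) < 256 by norm_num)
      have h2 := PySem.Int.mod_nonneg v (show (0:Int) < 256 by norm_num)
      omega
    have hm : M >>> 8 = m := by
      rw [Nat.shiftRight_eq_div_pow]
      omega
    norm_num [hm]
  · -- the eight inserted (index, bit) pairs agree
    simp only [hsr]
    simp only [show (1:Nat)+1=2 from rfl, show (2:Nat)+1=3 from rfl, show (3:Nat)+1=4 from rfl,
      show (4:Nat)+1=5 from rfl, show (5:Nat)+1=6 from rfl, show (6:Nat)+1=7 from rfl]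
    simp only [pvBoolCast]
    have b0 := hbit 0 (by norm_num)
    have b1 := hbit 1 (by norm_num)
    have b2 := hbit 2 (by norm_num)
    have b3 := hbit 3 (by norm_num)
    have b4 := hbit 4 (by norm_num)
    have b5 := hbit 5 (by norm_num)
    have b6 := hbit 6 (by norm_num)
    have b7 := hbit 7 (by norm_num)
    rw [show M >>> 0 = M from rfl] at b0
    simp only [b0, b1, b2, b3, b4, b5, b6, b7]
    norm_num [add_assoc, Int.shiftLeft_natCast_right,
      show ((1:Int) <<< (0:Int)) = 1 by decide, show ((1:Int) <<< (0:Nat)) = 1 by decide,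
      show ((1:Int) <<< (1:Int)) = 2 by decide, show ((1:Int) <<< (1:Nat)) = 2 by decide, show ((1:Int) <<< (2:Int)) = 4 by decide, show ((1:Int) <<< (2:Nat)) = 4 by decide, show ((1:Int) <<< (3:Int)) = 8 by decide, show ((1:Int) <<< (3:Nat)) = 8 by decide, show ((1:Int) <<< (4:Int)) = 16 by decide, show ((1:Int) <<< (4:Nat)) = 16 by decide, show ((1:Int) <<< (5:Int)) = 32 by decide, show ((1:Int) <<< (5:Nat)) = 32 by decide, show ((1:Int) <<< (6:Int)) = 64 by decide, show ((1:Int) <<< (6:Nat)) = 64 by decide, show ((1:Int) <<< (7:Int)) = 128 by decide, show ((1:Int) <<< (7:Nat)) = 128 by decide,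
      show Int.toNat 0 = 0 from rfl, show Int.toNat 1 = 1 from rfl,
      show Int.toNat 2 = 2 from rfl, show Int.toNat 3 = 3 from rfl,
      show Int.toNat 4 = 4 from rfl, show Int.toNat 5 = 5 from rfl,
      show Int.toNat 6 = 6 from rfl, show Int.toNat 7 = 7 from rfl]
  · ring

set_option maxRecDepth 8192 in
lemma pvMain (outf : Int) (vs : List Int) : ∀ (d0 : PySem.Dict Int Bool) (m : Nat),
    (PySem.List.pyRange 0 (8 * (vs.length : Int)) 1).foldl (pvStream outf)
        ((vs.foldl pvPackStep (0, 0)).1 + (m : Int) * 2 ^ (8 * vs.length), d0)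
      = ((m : Int), (vs.foldl pvStep (outf, d0)).2)
    ∧ (vs.foldl pvStep (outf, d0)).1 = outf + 8 * (vs.length : Int) := by
  induction vs using List.reverseRecOn with
  | nil =>
    intro d0 m
    simp [PySem.List.pyRange_one_eq_nil]
  | append_singleton vs v ih =>
    intro d0 m
    have hsnd : (vs.foldl pvPackStep (0, 0)).2 = 8 * vs.length := by
      have := pvPackSnd vs 0 0
      omega
    have hr0 : 0 ≤ PySem.Int.mod v 256 := PySem.Int.mod_nonneg v (by norm_num)
    -- the packed value after vs ++ [v]
    have hpack : ((vs ++ [v]).foldl pvPackStep (0, 0)).1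
        = (vs.foldl pvPackStep (0, 0)).1
          + ((PySem.Int.mod v 256).toNat : Int) * 2 ^ (8 * vs.length) := by
      rw [List.foldl_append]
      simp only [List.foldl_cons, List.foldl_nil, pvPackStep, hsnd]
      rw [pvShiftLeftNat _ hr0]
      have hexp : ((8 * (vs.length : Int))).toNat = 8 * vs.length := by omega
      have hmodcast : (PySem.Int.mod v 256) = ((PySem.Int.mod v 256).toNat : Int) := by omega
      rw [hexp, ← hmodcast]
    have hsplit : PySem.List.pyRange 0 (8 * (((vs ++ [v]).length : Nat) : Int)) 1
        = PySem.List.pyRange 0 (8 * (vs.length : Int)) 1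
          ++ PySem.List.pyRange (8 * (vs.length : Int)) (8 * (vs.length : Int) + 8) 1 := by
      have h := PySem.List.pyRange_one_append 0 (8 * (vs.length : Int))
        (8 * (vs.length : Int) + 8) (by positivity) (by omega)
      simp only [List.length_append, List.length_singleton]
      have h2 : (8 : Int) * (((vs.length : Nat) : Int) + 1) = 8 * (vs.length : Int) + 8 := by ring
      rw [Nat.cast_add, Nat.cast_one, h2, h]
    have hstart : ((vs ++ [v]).foldl pvPackStep (0, 0)).1 + (m : Int) * 2 ^ (8 * (vs ++ [v]).length)
        = (vs.foldl pvPackStep (0, 0)).1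
          + (((PySem.Int.mod v 256).toNat + 256 * m : Nat) : Int) * 2 ^ (8 * vs.length) := by
      rw [hpack]
      simp only [List.length_append, List.length_singleton]
      push_cast
      rw [show 8 * (vs.length + 1) = 8 * vs.length + 8 by ring, pow_add]
      ring_nf
    obtain ⟨ih1, ih2⟩ := ih d0 ((PySem.Int.mod v 256).toNat + 256 * m)
    obtain ⟨e12, e3⟩ := pvEight outf v m (8 * (vs.length : Int))
      ((vs.foldl pvStep (outf, d0)).2)
    constructor
    · rw [hsplit, List.foldl_append, hstart, ih1]
      rw [List.foldl_append]
      simp only [List.foldl_cons, List.foldl_nil]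
      have hcnt : (vs.foldl pvStep (outf, d0))
          = (outf + 8 * (vs.length : Int), (vs.foldl pvStep (outf, d0)).2) := by
        rw [← ih2]
      conv_rhs => rw [hcnt]
      exact e12
    · have hA2 : ((vs ++ [v]).foldl pvStep (outf, d0))
          = pvStep (vs.foldl pvStep (outf, d0)) v := by
        rw [List.foldl_append]; simp
      rw [hA2]
      have hcnt : (vs.foldl pvStep (outf, d0))
          = (outf + 8 * (vs.length : Int), (vs.foldl pvStep (outf, d0)).2) := by
        rw [← ih2]
      conv_lhs => rw [hcnt]
      rw [e3]
      simp only [List.length_append, List.length_singleton]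
      push_cast
      ring

-- ===== VERDICT (by name: the statement is the Claim_ definition above) =====
set_option maxHeartbeats 1000000 in
theorem hex2bits_py_spec : Claim_equal_hex2bits_py := by
  intro response input_first input_last output_first output _ _
  unfold Spec_hex2bits_py
  have hA : hex2bits_py response input_first input_last output_first output
      = ((PySem.List.pyRange input_first input_last 2).foldl
          (fun st digit => pvStep st ((PySem.Int.ofStrBase? (PySem.Str.slice response (some digit) (some (digit + 2))) 16).getD 0))
          (output_first, PySem.Dict.ofList output)).2.items := rfl
  have hB : hex2bits_py_alt response input_first input_last output_first output
      = ((PySem.List.pyRange 0 (((PySem.List.pyRange input_first input_last 2).foldl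
              (fun st digit => pvPackStep st ((PySem.Int.ofStrBase? (PySem.Str.slice response (some digit) (some (digit + 2))) 16).getD 0)) ((0 : Int), (0 : Int)))).2 1).foldl
          (pvStream output_first)
          ((((PySem.List.pyRange input_first input_last 2).foldl
              (fun st digit => pvPackStep st ((PySem.Int.ofStrBase? (PySem.Str.slice response (some digit) (some (digit + 2))) 16).getD 0)) ((0 : Int), (0 : Int)))).1, PySem.Dict.ofList output)).2.items := rfl
  rw [hA, hB]
  rw [← List.foldl_map (f := fun digit => ((PySem.Int.ofStrBase? (PySem.Str.slice response (some digit) (some (digit + 2))) 16).getD 0)) (g := pvStep),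
      ← List.foldl_map (f := fun digit => ((PySem.Int.ofStrBase? (PySem.Str.slice response (some digit) (some (digit + 2))) 16).getD 0)) (g := pvPackStep)]
  set vs : List Int :=
    (PySem.List.pyRange input_first input_last 2).map
      (fun digit => ((PySem.Int.ofStrBase? (PySem.Str.slice response (some digit) (some (digit + 2))) 16).getD 0)) with hvs
  have hsnd : (vs.foldl pvPackStep (0, 0)).2 = 8 * (vs.length : Int) := by
    have := pvPackSnd vs 0 0
    omega
  obtain ⟨h1, _⟩ := pvMain output_first vs (PySem.Dict.ofList output) 0
  rw [hsnd]
  have hz : (vs.foldl pvPackStep (0, 0)).1 + ((0 : Nat) : Int) * 2 ^ (8 * vs.length)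
      = (vs.foldl pvPackStep (0, 0)).1 := by push_cast; ring
  rw [← hz, h1]
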